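-- pv_equiv track=rewrite | github.com/guyb2022/python_basics | copy_unique_str.py | get_unique_chars
-- ===== SOURCE A (Python) =====
-- from collections import Counter
--
-- def get_unique_chars(str1, str2):
--     if len(str1) == 0:
--         return str2
--     elif len(str2) == 0:
--         return str1
--
--     char_count = Counter(str1) + Counter(str2)
--     unique_chars = [char for char, count in char_count.items() if count == 1]
--     return ''.join(unique_chars)
-- ===== SOURCE B (Python) =====
-- def get_unique_chars(str1, str2):
--     if len(str1) == 0:
--         return str2
--     elif len(str2) == 0:
--         return str1
--
--     combined = str1 + str2
--     out = []
--     for i, c in enumerate(combined):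
--         if c not in combined[:i] and c not in combined[i+1:]:
--             out.append(c)
--     return ''.join(out)
-- ===== Notes on version B (the rewrite author's own statement) =====
-- stated objective: alternative
-- what changed: Replaces the frequency-table approach (build two Counters, add them, filter items with count 1) by a positional scan with no counting at all: keep the character at position i iff it occurs nowhere else in the concatenation (absent from the prefix before i and from the suffix after i).
import Mathlib
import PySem

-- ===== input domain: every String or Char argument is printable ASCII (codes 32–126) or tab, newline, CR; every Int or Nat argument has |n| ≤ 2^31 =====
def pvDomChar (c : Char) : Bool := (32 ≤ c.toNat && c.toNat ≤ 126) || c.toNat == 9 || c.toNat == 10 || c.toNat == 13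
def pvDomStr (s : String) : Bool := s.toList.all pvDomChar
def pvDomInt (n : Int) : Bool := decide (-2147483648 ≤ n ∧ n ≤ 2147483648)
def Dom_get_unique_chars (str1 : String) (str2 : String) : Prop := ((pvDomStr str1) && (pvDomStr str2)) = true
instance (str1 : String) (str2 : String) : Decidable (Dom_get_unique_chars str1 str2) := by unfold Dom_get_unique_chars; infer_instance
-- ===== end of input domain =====

-- B: same guards, but no frequency table at all — a positional scan keeps the char at
-- position i iff it is absent from the prefix before i and the suffix after i (alternative).

-- ===== PORT A =====
-- Counter.__add__ as in CPython: self's items with summed counts (kept if > 0),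
-- then other's items whose key is not in self (kept if count > 0).
def pvCounterAdd (d1 d2 : PySem.Dict Char Int) : PySem.Dict Char Int :=
  PySem.Dict.mk
    ((d1.items.filterMap (fun p =>
        let s := p.2 + d2.getD p.1 0
        if 0 < s then some (p.1, s) else none)) ++
     (d2.items.filterMap (fun p =>
        if d1.contains p.1 then none
        else if 0 < p.2 then some p else none)))

def get_unique_chars (str1 : String) (str2 : String) : String :=
  if PySem.Str.len str1 == 0 then str2
  else if PySem.Str.len str2 == 0 then str1
  else
    let char_count := pvCounterAdd (PySem.Dict.counter str1.toList) (PySem.Dict.counter str2.toList)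
    let unique_chars := (char_count.items.filter (fun p => p.2 == 1)).map Prod.fst
    String.mk unique_chars

-- ===== PORT B =====
-- the loop 'for i, c in enumerate(combined): if c not in combined[:i] and c not in combined[i+1:]'
-- appending the survivors, as filter-then-map over the enumeration (slices via PySem.List.slice)
def get_unique_chars_alt (str1 : String) (str2 : String) : String :=
  if PySem.Str.len str1 == 0 then str2
  else if PySem.Str.len str2 == 0 then str1
  else
    let combined := str1.toList ++ str2.toList
    String.mk (((PySem.List.enumerate combined).filter
        (fun p => !(PySem.List.slice combined none (some p.1)).contains p.2
                && !(PySem.List.slice combined (some (p.1 + 1)) none).contains p.2)).map Prod.snd)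

-- ===== PRECONDITION & SPEC =====
def Spec_get_unique_chars (str1 : String) (str2 : String) (out : String) : Prop := out = get_unique_chars_alt str1 str2
instance (str1 : String) (str2 : String) (out : String) : Decidable (Spec_get_unique_chars str1 str2 out) := by unfold Spec_get_unique_chars; infer_instance

-- ===== CLAIM (what is proved, stated in full; the proofs are below) =====
def Claim_equal_get_unique_chars : Prop := ∀ (str1 : String) (str2 : String), Dom_get_unique_chars str1 str2 → Spec_get_unique_chars str1 str2 (get_unique_chars str1 str2)

-- ===== LEMMAS AND PROOFS =====

-- foldl Set.add from any start: start ++ the fresh part of the dedup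
theorem pv_foldl_add {α : Type} [BEq α] [LawfulBEq α] (l : List α) (s : PySem.Set α) :
    List.foldl PySem.Set.add s l
      = s ++ (PySem.List.dedup l).filter (fun y => !(s.contains y)) := by
  induction l generalizing s with
  | nil => simp [PySem.List.dedup, PySem.Set.ofList]
  | cons x t ih =>
    have hd : PySem.List.dedup (x :: t)
        = x :: (PySem.List.dedup t).filter (fun y => !(y == x)) := by
      show List.foldl PySem.Set.add PySem.Set.empty (x :: t) = _
      rw [List.foldl_cons, ih]
      simp [PySem.Set.add, PySem.Set.empty, PySem.Set.contains]
    rw [List.foldl_cons, ih, hd]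
    by_cases hx : x ∈ s
    · have hadd : PySem.Set.add s x = s := by
        simp [PySem.Set.add, PySem.Set.contains, hx]
      rw [hadd]
      simp only [List.filter_cons]
      have hcx : (!(s.contains x)) = false := by simp [hx]
      rw [hcx]
      simp only [Bool.false_eq_true, if_false, List.filter_filter]
      congr 1
      apply List.filter_congr
      intro y _
      by_cases hyx : y = x
      · subst hyx; simp [hx]
      · simp [hyx]
    · have hadd : PySem.Set.add s x = s ++ [x] := by
        simp [PySem.Set.add, PySem.Set.contains, hx]
      rw [hadd]
      simp only [List.filter_cons]
      have hcx : (!(s.contains x)) = true := by simp [hx]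
      rw [hcx]
      simp only [if_true, List.append_assoc, List.singleton_append, List.filter_filter]
      congr 1
      congr 1
      apply List.filter_congr
      intro y _
      by_cases hyx : y = x
      · subst hyx; simp
      · simp [hyx]

theorem pv_dedup_cons {α : Type} [BEq α] [LawfulBEq α] (x : α) (t : List α) :
    PySem.List.dedup (x :: t) = x :: (PySem.List.dedup t).filter (fun y => !(y == x)) := by
  show List.foldl PySem.Set.add PySem.Set.empty (x :: t) = _
  rw [List.foldl_cons, pv_foldl_add]
  simp [PySem.Set.add, PySem.Set.empty, PySem.Set.contains]

theorem pv_contains_dedup {α : Type} [BEq α] [LawfulBEq α] (l : List α) (y : α) :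
    (PySem.List.dedup l).contains y = l.contains y := by
  by_cases hy : y ∈ l <;> simp [hy]

theorem pv_dedup_append {α : Type} [BEq α] [LawfulBEq α] (l1 l2 : List α) :
    PySem.List.dedup (l1 ++ l2)
      = PySem.List.dedup l1 ++ (PySem.List.dedup l2).filter (fun y => !(l1.contains y)) := by
  show List.foldl PySem.Set.add PySem.Set.empty (l1 ++ l2) = _
  rw [List.foldl_append]
  rw [pv_foldl_add]
  congr 1
  apply List.filter_congr
  intro y _
  rw [show (List.foldl PySem.Set.add PySem.Set.empty l1).contains y = l1.contains y from
    pv_contains_dedup l1 y]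

theorem pv_mem_dedup {α : Type} [BEq α] [LawfulBEq α] (l : List α) (x : α) :
    x ∈ PySem.List.dedup l ↔ x ∈ l := PySem.List.mem_dedup l x

-- items of a Counter: the distinct elements in first-appearance order with their counts
theorem pv_items_counter (l : List Char) :
    (PySem.Dict.counter l).items
      = (PySem.List.dedup l).map (fun k => (k, (l.count k : Int))) := by
  induction l using List.reverseRecOn with
  | nil => simp [PySem.Dict.counter, PySem.Dict.empty, PySem.List.dedup, PySem.Set.ofList]
  | append_singleton t x ih =>
    have hstep : PySem.Dict.counter (t ++ [x])
        = (PySem.Dict.counter t).modify x 0 (· + 1) := by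
      simp [PySem.Dict.counter, List.foldl_append]
    have hget : (PySem.Dict.counter t).getD x 0 = (t.count x : Int) :=
      PySem.Dict.getD_counter t x
    have hcont : (PySem.Dict.counter t).contains x = t.contains x := by
      have := PySem.Dict.contains_counter (xs := t) (v := x)
      simpa using this
    have hded : PySem.List.dedup (t ++ [x])
        = PySem.List.dedup t ++ (if x ∈ t then [] else [x]) := by
      rw [pv_dedup_append]
      have hdx : PySem.List.dedup [x] = [x] := by
        simp [PySem.List.dedup, PySem.Set.ofList, PySem.Set.add, PySem.Set.empty,
          PySem.Set.contains]
      rw [hdx]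
      by_cases hx : x ∈ t <;> simp [hx]
    rw [hstep, PySem.Dict.modify, hget]
    by_cases hx : x ∈ t
    · have hc : (PySem.Dict.counter t).contains x = true := by
        rw [hcont]; simpa using hx
      simp only [PySem.Dict.insert, hc, if_pos]
      rw [ih, hded]
      simp only [hx, if_pos, List.append_nil, List.map_map]
      apply List.map_congr_left
      intro k hk
      by_cases hkx : k = x
      · subst hkx
        simp [List.count_append]
      · simp [hkx, List.count_append, List.count_singleton]
        exact fun h => hkx h.symm
    · have hc : (PySem.Dict.counter t).contains x = false := by
        rw [hcont]; simpa using hx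
      simp only [PySem.Dict.insert, hc]
      rw [ih, hded]
      simp only [hx, if_neg, Bool.false_eq_true, not_false_iff, List.map_append]
      congr 1
      · apply List.map_congr_left
        intro k hk
        have hkt : k ∈ t := (pv_mem_dedup t k).1 hk
        have hkx : k ≠ x := fun h => hx (h ▸ hkt)
        simp [List.count_append, List.count_singleton]
        exact fun h => hkx h.symm
      · have : t.count x = 0 := List.count_eq_zero.2 hx
        simp [List.count_append, this]

-- a filterMap whose test always passes is a map
theorem pv_filterMap_pos (l : List Char) (h : Char → Int)
    (hp : ∀ k ∈ l, 0 < h k) :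
    l.filterMap (fun k => if 0 < h k then some (k, h k) else none)
      = l.map (fun k => (k, h k)) := by
  induction l with
  | nil => rfl
  | cons a t ih =>
    simp only [List.filterMap_cons, List.map_cons]
    rw [if_pos (hp a (List.mem_cons_self))]
    rw [ih (fun k hk => hp k (List.mem_cons_of_mem a hk))]

-- a filterMap with a skip-test and an always-passing positivity test
theorem pv_filterMap_guard (l : List Char) (q : Char → Bool) (h : Char → Int)
    (hp : ∀ k ∈ l, 0 < h k) :
    l.filterMap (fun k => if q k then none else if 0 < h k then some (k, h k) else none)
      = (l.filter (fun k => !(q k))).map (fun k => (k, h k)) := by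
  induction l with
  | nil => rfl
  | cons a t ih =>
    simp only [List.filterMap_cons, List.filter_cons]
    cases hq : q a with
    | true => simpa using ih (fun k hk => hp k (List.mem_cons_of_mem a hk))
    | false =>
      rw [if_neg (by simp), if_pos (hp a List.mem_cons_self)]
      simp only [Bool.not_false, if_true, List.map_cons]
      rw [ih (fun k hk => hp k (List.mem_cons_of_mem a hk))]

-- filter by count == 1 commutes with tagging each key with its count
theorem pv_tail (L : List Char) (g : Char → Nat) :
    ((L.map (fun k => (k, (g k : Int)))).filter (fun p => p.2 == 1)).map Prod.fst
      = L.filter (fun c => g c == 1) := by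
  induction L with
  | nil => rfl
  | cons a t ih =>
    simp only [List.map_cons, List.filter_cons]
    by_cases h : g a = 1
    · simp only [h]
      simp [ih]
    · have h1 : (((g a : Int)) == (1 : Int)) = false := by simp [h]
      have h2 : (g a == 1) = false := by simp [h]
      simp [h1, h2, ih]

-- A's result on the concatenation: the distinct chars, in first-appearance order, with total count 1
theorem pv_main (l1 l2 : List Char) :
    ((pvCounterAdd (PySem.Dict.counter l1) (PySem.Dict.counter l2)).items.filter
        (fun p => p.2 == 1)).map Prod.fst
      = (PySem.List.dedup (l1 ++ l2)).filter (fun c => (l1 ++ l2).count c == 1) := by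
  have hcont1 : ∀ k, (PySem.Dict.counter l1).contains k = l1.contains k := by
    intro k
    have := PySem.Dict.contains_counter (xs := l1) (v := k)
    simpa using this
  have hpart1 : (PySem.Dict.counter l1).items.filterMap (fun p =>
        let s := p.2 + (PySem.Dict.counter l2).getD p.1 0
        if 0 < s then some (p.1, s) else none)
      = (PySem.List.dedup l1).map (fun k => (k, ((l1 ++ l2).count k : Int))) := by
    rw [pv_items_counter, List.filterMap_map]
    have : ((fun p : Char × Int =>
          let s := p.2 + (PySem.Dict.counter l2).getD p.1 0
          if 0 < s then some (p.1, s) else none) ∘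
        (fun k => (k, (l1.count k : Int))))
        = fun k => if 0 < ((l1 ++ l2).count k : Int)
            then some (k, ((l1 ++ l2).count k : Int)) else none := by
      funext k
      simp [PySem.Dict.getD_counter, List.count_append]
    rw [this, pv_filterMap_pos]
    intro k hk
    have hkl : k ∈ l1 := (pv_mem_dedup l1 k).1 hk
    have : 0 < l1.count k := List.count_pos_iff.2 hkl
    simp [List.count_append]
    omega
  have hpart2 : (PySem.Dict.counter l2).items.filterMap (fun p =>
        if (PySem.Dict.counter l1).contains p.1 then none
        else if 0 < p.2 then some p else none)
      = ((PySem.List.dedup l2).filter (fun y => !(l1.contains y))).map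
          (fun k => (k, (l2.count k : Int))) := by
    rw [pv_items_counter, List.filterMap_map]
    have hfun : ((fun p : Char × Int =>
          if (PySem.Dict.counter l1).contains p.1 then none
          else if 0 < p.2 then some p else none) ∘
        (fun k => (k, (l2.count k : Int))))
        = fun k => if l1.contains k then none
            else if 0 < (l2.count k : Int) then some (k, (l2.count k : Int)) else none := by
      funext k
      simp [hcont1]
    rw [hfun, pv_filterMap_guard]
    intro k hk
    have hkl : k ∈ l2 := (pv_mem_dedup l2 k).1 hk
    have : 0 < l2.count k := List.count_pos_iff.2 hkl
    omega
  have hitems : (pvCounterAdd (PySem.Dict.counter l1) (PySem.Dict.counter l2)).items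
      = ((PySem.Dict.counter l1).items.filterMap (fun p =>
          let s := p.2 + (PySem.Dict.counter l2).getD p.1 0
          if 0 < s then some (p.1, s) else none)) ++
        ((PySem.Dict.counter l2).items.filterMap (fun p =>
          if (PySem.Dict.counter l1).contains p.1 then none
          else if 0 < p.2 then some p else none)) := rfl
  rw [hitems, hpart1, hpart2, pv_dedup_append, List.filter_append, List.map_append,
    List.filter_append]
  congr 1
  · rw [pv_tail]
  · rw [pv_tail]
    apply List.filter_congr
    intro k hk
    have hnk : k ∉ l1 := by
      have := (List.mem_filter.1 hk).2
      simp at this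
      exact this
    have hz : l1.count k = 0 := List.count_eq_zero.2 hnk
    simp [List.count_append, hz]

-- B's positional scan, generalized over a split of the concatenation: the survivors of the
-- suffix are its distinct chars, in order, that avoid the prefix and occur once in the suffix
theorem pv_scan (s : List Char) :
    ∀ (rest pre : List Char), s = pre ++ rest →
    ((PySem.List.enumerate rest (pre.length : Int)).filter
        (fun p => !(PySem.List.slice s none (some p.1)).contains p.2
                && !(PySem.List.slice s (some (p.1 + 1)) none).contains p.2)).map Prod.snd
      = (PySem.List.dedup rest).filter (fun c => !pre.contains c && rest.count c == 1) := by
  intro rest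
  induction rest with
  | nil =>
    intro pre _
    simp [PySem.List.enumerate, PySem.List.dedup, PySem.Set.ofList]
  | cons x t ih =>
    intro pre hs
    rw [PySem.List.enumerate_cons]
    have htake : PySem.List.slice s none (some (pre.length : Int)) = pre := by
      rw [PySem.List.slice_to_natCast, hs, List.take_left]
    have hdrop : PySem.List.slice s (some ((pre.length : Int) + 1)) none = t := by
      have h1 : ((pre.length : Int) + 1) = (((pre.length + 1 : Nat)) : Int) := by push_cast; ring
      rw [h1, PySem.List.slice_from_natCast, hs]
      rw [show pre.length + 1 = (pre ++ [x]).length by simp]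
      rw [show pre ++ x :: t = (pre ++ [x]) ++ t by simp]
      rw [List.drop_left]
    have hnext : ((pre.length : Int) + 1) = (((pre ++ [x]).length : Nat) : Int) := by
      simp
    have hih := ih (pre ++ [x]) (by simpa using hs)
    rw [List.filter_cons]
    simp only [htake, hdrop]
    rw [pv_dedup_cons, List.filter_cons]
    have htail :
        ((PySem.List.enumerate t ((pre.length : Int) + 1)).filter
            (fun p => !(PySem.List.slice s none (some p.1)).contains p.2
                    && !(PySem.List.slice s (some (p.1 + 1)) none).contains p.2)).map Prod.snd
          = ((PySem.List.dedup t).filter (fun y => !(y == x))).filter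
              (fun c => !pre.contains c && (x :: t).count c == 1) := by
      rw [hnext, hih, List.filter_filter]
      apply List.filter_congr
      intro y _
      by_cases hyx : y = x
      · subst hyx; simp
      · have hxy : ¬ x = y := fun h => hyx h.symm
        have hc : (x :: t).count y = t.count y := by
          simp [hxy]
        by_cases hpy : y ∈ pre <;>
          simp [hyx, hc, hpy, List.mem_append]
    by_cases hp : x ∈ pre <;> by_cases ht : x ∈ t
    · rw [if_neg (by simp [hp]), if_neg (by simp [hp])]
      exact htail
    · rw [if_neg (by simp [hp]), if_neg (by simp [hp])]
      exact htail
    · have hpos : 0 < t.count x := List.count_pos_iff.2 ht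
      rw [if_neg (by simp [ht]), if_neg (by simp [hp]; omega)]
      exact htail
    · have hz : t.count x = 0 := List.count_eq_zero.2 ht
      rw [if_pos (by simp [hp, ht]), if_pos (by simp [hp, hz])]
      simp only [List.map_cons]
      rw [htail]

-- ===== VERDICT (by name: the statement is the Claim_ definition above) =====
theorem get_unique_chars_spec : Claim_equal_get_unique_chars := by
  intro str1 str2 _
  show get_unique_chars str1 str2 = get_unique_chars_alt str1 str2
  unfold get_unique_chars get_unique_chars_alt
  split_ifs with h1 h2
  · rfl
  · rfl
  · refine congrArg String.mk ?_
    rw [pv_main]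
    have := pv_scan (str1.toList ++ str2.toList) (str1.toList ++ str2.toList) [] (by simp)
    simp only [List.length_nil, Nat.cast_zero] at this
    rw [show PySem.List.enumerate (str1.toList ++ str2.toList)
        = PySem.List.enumerate (str1.toList ++ str2.toList) 0 from rfl]
    rw [this]
    apply List.filter_congr
    intro c _
    simp
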